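-- pv_equiv track=rewrite | github.com/soyiu100/uw_grade_distrib | courses/local_course_oper.py | base4sub
-- ===== SOURCE A (Python) =====
-- def base4sub(value, arg):
--     month = value % 10
--     i = 0
--     test = month - arg
--     while test <= 0:
--         test += 4
--         i += 1
--     return (int(value / 10) - i) * 10 + test
-- ===== SOURCE B (Python) =====
-- def base4sub(value, arg):
--     # Closed form: no loop; i is the number of 4-steps the while loop in A would take.
--     month = value % 10
--     d = arg - month
--     i = d // 4 + 1 if d >= 0 else 0
--     test = month - arg + 4 * i
--     return (int(value / 10) - i) * 10 + test
-- ===== Notes on version B (the rewrite author's own statement) =====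
-- stated objective: faster
-- what changed: Replaced the while loop that repeatedly adds 4 until positive with the closed form i = (arg - month)//4 + 1 (0 if arg < month).
import Mathlib
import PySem

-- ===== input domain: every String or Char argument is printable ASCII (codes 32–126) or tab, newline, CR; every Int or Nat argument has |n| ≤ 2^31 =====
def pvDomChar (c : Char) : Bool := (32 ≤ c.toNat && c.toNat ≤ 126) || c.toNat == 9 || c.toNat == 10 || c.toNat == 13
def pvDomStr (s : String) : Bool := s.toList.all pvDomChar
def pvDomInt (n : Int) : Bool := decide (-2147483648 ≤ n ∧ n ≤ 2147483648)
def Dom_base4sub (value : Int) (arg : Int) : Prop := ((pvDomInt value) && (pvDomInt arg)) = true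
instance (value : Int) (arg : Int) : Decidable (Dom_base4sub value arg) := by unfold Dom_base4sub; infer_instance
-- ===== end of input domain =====

-- B replaces A's while loop (repeatedly add 4 until positive) with the closed form
-- i = (arg - month)//4 + 1 (0 when arg < month): O(1) instead of O(arg - value%10).
-- int(value/10) in Python truncates toward zero on this domain (exact for |value| ≤ 2^31): Int.tdiv.

-- ===== PORT A =====
-- the while loop: state (test, i), repeat test += 4; i += 1 while test ≤ 0
def base4subLoop (test : Int) (i : Int) : Int × Int :=
  if test ≤ 0 then base4subLoop (test + 4) (i + 1) else (test, i)
termination_by (1 - test).toNat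
decreasing_by omega

def base4sub (value : Int) (arg : Int) : Int :=
  let month := PySem.Int.mod value 10
  let p := base4subLoop (month - arg) 0
  (Int.tdiv value 10 - p.2) * 10 + p.1

-- ===== PORT B =====
def base4sub_alt (value : Int) (arg : Int) : Int :=
  let month := PySem.Int.mod value 10
  let d := arg - month
  let i := if 0 ≤ d then PySem.Int.floordiv d 4 + 1 else 0
  let test := month - arg + 4 * i
  (Int.tdiv value 10 - i) * 10 + test

-- ===== PRECONDITION & SPEC =====
def Spec_base4sub (value : Int) (arg : Int) (out : Int) : Prop := out = base4sub_alt value arg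
instance (value : Int) (arg : Int) (out : Int) : Decidable (Spec_base4sub value arg out) := by unfold Spec_base4sub; infer_instance

-- ===== CLAIM (what is proved, stated in full; the proofs are below) =====
def Claim_equal_base4sub : Prop := ∀ (value : Int) (arg : Int), Dom_base4sub value arg → Spec_base4sub value arg (base4sub value arg)

-- ===== LEMMAS AND PROOFS =====

-- the number of iterations A's loop performs from state test
def loopCount (test : Int) : Int := if test ≤ 0 then (-test) / 4 + 1 else 0

theorem base4subLoop_eq (test i : Int) :
    base4subLoop test i = (test + 4 * loopCount test, i + loopCount test) := by
  fun_induction base4subLoop test i with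
  | case1 t j ht ih =>
      rw [ih]
      have h1 : loopCount t = loopCount (t + 4) + 1 := by
        unfold loopCount; split_ifs <;> omega
      rw [h1, Prod.mk.injEq]; constructor <;> ring
  | case2 t j ht =>
      unfold loopCount
      rw [if_neg ht, Prod.mk.injEq]
      constructor <;> ring

theorem base4sub_spec' (value arg : Int) : base4sub value arg = base4sub_alt value arg := by
  unfold base4sub base4sub_alt
  simp only [base4subLoop_eq]
  simp only [loopCount]
  have hfd : PySem.Int.floordiv (arg - PySem.Int.mod value 10) 4
      = (arg - PySem.Int.mod value 10) / 4 :=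
    PySem.Int.floordiv_eq_ediv_of_pos (by omega)
  rw [hfd]
  set m := PySem.Int.mod value 10
  split_ifs with h1 h2 h2 <;> first | omega | (ring_nf; omega)

-- ===== VERDICT (by name: the statement is the Claim_ definition above) =====
theorem base4sub_spec : Claim_equal_base4sub := by
  intro value arg _
  unfold Spec_base4sub
  exact base4sub_spec' value arg
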